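-- pv_equiv track=rewrite | github.com/halak0013/4KAgent | utils/toolchain_merge.py | insert_after_super_resolution
-- ===== SOURCE A (Python) =====
-- def find_super_resolution_index(chain: str) -> int:
--     """
--     Return the index of the substring 'super-resolution@' in chain in a case-insensitive way.
--     Returns -1 if not found.
--     """
--     return chain.lower().find('super-resolution@')
--
-- def insert_after_super_resolution(chain: str, method: str) -> str:
--     """
--     Insert "(face-restoration@{method})" immediately after the full super-resolution@<method>
--     token (i.e., after the method name, before following '-' / whitespace / punctuation / end).
--     If no 'super-resolution@' found, return the original chain unchanged.
--     """
--     idx = find_super_resolution_index(chain)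
--     if idx == -1:
--         return chain
--
--     snippet = f"(face-restoration@{method})"
--     start_after_at = idx + len('super-resolution@')
--     # scan from start_after_at to find the end of the method name
--     n = len(chain)
--     delimiters = set(['-', ' ', '\t', '\n', '.', ',', ';', ':', '!', '?', ')', '('])
--     end = start_after_at
--     while end < n and chain[end] not in delimiters:
--         end += 1
--     # insert snippet at 'end' (before the delimiter or at end of string)
--     return chain[:end] + snippet + chain[end:]
-- ===== SOURCE B (Python) =====
-- TOKEN = 'super-resolution@'
-- DELIMITERS = '- \t\n.,;:!?()'
--
-- def insert_after_super_resolution(chain: str, method: str) -> str: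
--     idx = chain.lower().find(TOKEN)
--     if idx == -1:
--         return chain
--     # the method name is the rest of the chain truncated at the first delimiter:
--     # split once at each delimiter and keep the piece before it
--     name = chain[idx + len(TOKEN):]
--     for d in DELIMITERS:
--         name = name.split(d, 1)[0]
--     cut = idx + len(TOKEN) + len(name)
--     return f"{chain[:cut]}(face-restoration@{method}){chain[cut:]}"
-- ===== Notes on version B (the rewrite author's own statement) =====
-- stated objective: idiomatic
-- what changed: B keeps the lower().find token lookup but replaces A's explicit index while-loop over a delimiter set by slicing off the tail after the token and truncating it with split(d,1)[0] at each delimiter to obtain the method name.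
import Mathlib
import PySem

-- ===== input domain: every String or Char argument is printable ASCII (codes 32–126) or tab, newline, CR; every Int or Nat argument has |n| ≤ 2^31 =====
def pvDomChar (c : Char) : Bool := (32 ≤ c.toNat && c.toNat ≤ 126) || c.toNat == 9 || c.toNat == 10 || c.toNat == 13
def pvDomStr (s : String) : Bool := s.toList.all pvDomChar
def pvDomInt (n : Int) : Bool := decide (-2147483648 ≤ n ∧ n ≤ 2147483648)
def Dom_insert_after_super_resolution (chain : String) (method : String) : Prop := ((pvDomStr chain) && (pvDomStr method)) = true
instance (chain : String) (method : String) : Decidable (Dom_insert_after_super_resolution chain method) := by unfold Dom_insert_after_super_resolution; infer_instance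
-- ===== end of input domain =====

-- B keeps lower().find to locate the token but replaces A's explicit index while-scan over a
-- delimiter set by slicing off the tail and truncating it with split(d,1)[0] at each delimiter
-- (idiomatic decomposition; no speed claim).


-- ===== PORT A =====
-- the delimiter set (Python builds a set of these 12 chars; only membership is used,
-- so list membership is an exact port)
def pvDelimsA : List Char := ['-', ' ', '\t', '\n', '.', ',', ';', ':', '!', '?', ')', '(']

-- chain.lower().find('super-resolution@')
def find_super_resolution_index (chain : String) : Int :=
  PySem.Str.find (PySem.Str.lower chain) "super-resolution@"

-- while end < n and chain[end] not in delimiters: end += 1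
def pvScanEndA (cs : List Char) (e : Nat) : Nat :=
  if h : e < cs.length then
    if pvDelimsA.contains cs[e] then e else pvScanEndA cs (e + 1)
  else e
termination_by cs.length - e

def insert_after_super_resolution (chain : String) (method : String) : String :=
  let idx := find_super_resolution_index chain
  if idx == -1 then chain
  else
    let snippet := "(face-restoration@" ++ method ++ ")"
    let cs := chain.toList
    -- start_after_at = idx + len('super-resolution@') = idx + 17; idx ≥ 0 here (guard), so toNat is exact
    let e := pvScanEndA cs ((idx + 17).toNat)
    String.ofList (PySem.List.slice cs none (some (e : Int)) ++ snippet.toList ++ PySem.List.slice cs (some (e : Int)) none)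

-- ===== PORT B =====
def pvDelimsB : List Char := "- \t\n.,;:!?()".toList

def insert_after_super_resolution_alt (chain : String) (method : String) : String :=
  let idx := PySem.Str.find (PySem.Str.lower chain) "super-resolution@"
  if idx == -1 then chain
  else
    let cs := chain.toList
    -- name.split(d, 1)[0] for a ONE-CHAR separator d is exactly the prefix before the first d:
    -- takeWhile (· != d) — exact port of the split-once truncation
    let name := pvDelimsB.foldl (fun s d => s.takeWhile (fun c => c != d))
      (PySem.List.slice cs (some (idx + 17)) none)
    let cut := idx + 17 + (name.length : Int)
    String.ofList (PySem.List.slice cs none (some cut) ++ ("(face-restoration@" ++ method ++ ")").toList ++ PySem.List.slice cs (some cut) none)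

-- ===== PRECONDITION & SPEC =====
def Spec_insert_after_super_resolution (chain : String) (method : String) (out : String) : Prop := out = insert_after_super_resolution_alt chain method
instance (chain : String) (method : String) (out : String) : Decidable (Spec_insert_after_super_resolution chain method out) := by unfold Spec_insert_after_super_resolution; infer_instance

-- ===== CLAIM (what is proved, stated in full; the proofs are below) =====
def Claim_equal_insert_after_super_resolution : Prop := ∀ (chain : String) (method : String), Dom_insert_after_super_resolution chain method → Spec_insert_after_super_resolution chain method (insert_after_super_resolution chain method)

-- ===== LEMMAS AND PROOFS =====

-- same DISTINCT characters, different order — only membership matters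
theorem pvDelimsBA : (fun c : Char => !(pvDelimsB.contains c)) = (fun c : Char => !(pvDelimsA.contains c)) := by
  funext c
  simp only [pvDelimsB, pvDelimsA]
  have : "- \t\n.,;:!?()".toList = ['-', ' ', '\t', '\n', '.', ',', ';', ':', '!', '?', '(', ')'] := by decide
  rw [this]
  simp only [List.contains_eq_mem, List.mem_cons, List.not_mem_nil, or_false]
  by_cases h1 : c = '(' <;> by_cases h2 : c = ')' <;> simp [h1, h2]

-- A's while-scan from index e stops exactly after the delimiter-free prefix of the remainder
theorem pvScanEndA_eq (cs : List Char) :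
    ∀ e, pvScanEndA cs e = e + ((cs.drop e).takeWhile (fun c => !(pvDelimsA.contains c))).length := by
  intro e
  induction e using pvScanEndA.induct cs with
  | case1 e h hd =>
    have hd' : cs[e] ∈ pvDelimsA := by simpa using hd
    rw [pvScanEndA, dif_pos h, if_pos hd, List.drop_eq_getElem_cons h, List.takeWhile_cons]
    simp [hd']
  | case2 e h hd ih =>
    have hd' : ¬ cs[e] ∈ pvDelimsA := by simpa using hd
    rw [pvScanEndA, dif_pos h, if_neg hd, ih, List.drop_eq_getElem_cons h, List.takeWhile_cons]
    simp [hd']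
    omega
  | case3 e h =>
    rw [pvScanEndA]
    have : cs.drop e = [] := List.drop_eq_nil_of_le (by omega)
    simp [h, this]

-- B's repeated split-truncation is the delimiter-free prefix
theorem pvFoldl_cut (ds : List Char) :
    ∀ rest : List Char, ds.foldl (fun s d => s.takeWhile (fun c => c != d)) rest
      = rest.takeWhile (fun c => !(ds.contains c)) := by
  induction ds with
  | nil =>
    intro rest
    exact ((List.takeWhile_eq_self_iff.mpr (fun a _ => rfl)).symm)
  | cons d ds ih =>
    intro rest
    rw [List.foldl_cons, ih, List.takeWhile_takeWhile]
    congr 1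
    funext c
    by_cases hcd : c = d <;> by_cases hm : c ∈ ds <;> simp [hcd, hm]

-- ===== VERDICT (by name: the statement is the Claim_ definition above) =====
theorem insert_after_super_resolution_spec : Claim_equal_insert_after_super_resolution := by
  intro chain method _
  unfold Spec_insert_after_super_resolution
  unfold insert_after_super_resolution insert_after_super_resolution_alt find_super_resolution_index
  simp only []
  set idx := PySem.Str.find (PySem.Str.lower chain) "super-resolution@" with hidx
  by_cases h : idx = -1
  · simp [h]
  · have hge : 0 ≤ idx := by
      have := PySem.Chars.neg_one_le_find (PySem.Str.lower chain).toList "super-resolution@".toList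
      have he : idx = PySem.Chars.find (PySem.Str.lower chain).toList "super-resolution@".toList := by
        simp [hidx, PySem.Str.find_eq]
      omega
    rw [if_neg (by simpa using h), if_neg (by simpa using h)]
    set cs := chain.toList with hcs
    have hslice : PySem.List.slice cs (some (idx + 17)) none = cs.drop (idx + 17).toNat := by
      rw [PySem.List.slice_from]; omega
    rw [pvScanEndA_eq, pvFoldl_cut, pvDelimsBA, hslice]
    have hcast : idx + 17 + (((cs.drop (idx + 17).toNat).takeWhile (fun c => !(pvDelimsA.contains c))).length : Int)
        = (((idx + 17).toNat + ((cs.drop (idx + 17).toNat).takeWhile (fun c => !(pvDelimsA.contains c))).length : Nat) : Int) := by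
      push_cast; omega
    rw [hcast]
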